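-- pv_equiv track=rewrite | github.com/vganapati/leetcode | 42.py | find_nearest_high
-- ===== SOURCE A (Python) =====
-- def find_nearest_high(current_ind, height):
--     # find pointer_1_ind
--     pointer_1_ind = current_ind
--     current_height = height[current_ind]
--     for ind,h in enumerate(height[current_ind+1:]):
--         if h>=current_height:
--             pointer_1_ind = ind + current_ind + 1
--             current_height = h
--     return pointer_1_ind
-- ===== SOURCE B (Python) =====
-- def find_nearest_high(current_ind, height):
--     height[current_ind]  # preserve IndexError on an out-of-range index
--     suffix = height[current_ind:]
--     m = max(suffix)
--     # rightmost position of the suffix maximum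
--     return current_ind + len(suffix) - 1 - suffix[::-1].index(m)
-- ===== Notes on version B (the rewrite author's own statement) =====
-- stated objective: alternative
-- what changed: Replaces A's forward greedy loop that tracks a running (pointer, current_height) pair by an aggregate-then-locate pass: take max of the suffix height[current_ind:] and find its rightmost occurrence via reverse().index().
-- intended difference: At current_ind = -1 A's slice height[current_ind+1:] wraps around to the whole list, so A returns the last index of the global maximum (e.g. 0 for ([5],)), while B returns -1, i.e. the bar itself, consistent with A's own result at the equivalent index len(height)-1; B's value is the intended 'nearest high from the last bar'. — e.g. on find_nearest_high(-1, [5]): A returns 0, B returns -1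
import Mathlib
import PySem

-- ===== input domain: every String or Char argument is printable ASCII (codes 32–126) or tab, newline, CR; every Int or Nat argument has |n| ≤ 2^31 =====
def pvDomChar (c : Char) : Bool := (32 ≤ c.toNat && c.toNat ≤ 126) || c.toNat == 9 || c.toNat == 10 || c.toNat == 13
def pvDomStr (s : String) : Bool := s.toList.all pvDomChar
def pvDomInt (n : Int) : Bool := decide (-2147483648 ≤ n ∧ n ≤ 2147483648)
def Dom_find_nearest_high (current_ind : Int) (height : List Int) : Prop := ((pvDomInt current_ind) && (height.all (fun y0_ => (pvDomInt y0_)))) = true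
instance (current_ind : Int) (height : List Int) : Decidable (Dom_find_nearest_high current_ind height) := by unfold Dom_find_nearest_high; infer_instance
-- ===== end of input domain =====

-- B replaces A's forward greedy chain-tracking loop by max-of-suffix plus a rightmost-occurrence
-- lookup on the reversed suffix (alternative decomposition; return value only, no mutation).

-- ===== PORT A =====
-- the 'for ind,h in enumerate(height[current_ind+1:])' loop, carrying (pointer_1_ind, current_height)
def fnhLoop (ci : Int) : Nat → List Int → Int → Int → Int
  | _, [], p, _ => p
  | ind, h :: t, p, c =>
      if h ≥ c then fnhLoop ci (ind + 1) t ((ind : Int) + ci + 1) h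
      else fnhLoop ci (ind + 1) t p c

def find_nearest_high (current_ind : Int) (height : List Int) : Int :=
  match PySem.List.pyGet? height current_ind with
  | none => 0  -- IndexError in Python; excluded by Pre_
  | some current_height =>
      fnhLoop current_ind 0 (PySem.List.slice height (some (current_ind + 1)) none)
        current_ind current_height

-- ===== PORT B =====
def find_nearest_high_alt (current_ind : Int) (height : List Int) : Int :=
  match PySem.List.pyGet? height current_ind with
  | none => 0  -- IndexError in Python; excluded by Pre_
  | some _ =>
      let suffix := PySem.List.slice height (some current_ind) none
      match PySem.List.max? suffix (fun y => y) with
      | none => 0  -- unreachable: suffix nonempty under Pre_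
      | some m =>
          -- suffix[::-1] is the reverse (PySem.List.slice?_none_none_neg_one)
          match PySem.List.index? suffix.reverse m with
          | none => 0  -- unreachable: m ∈ suffix
          | some i => current_ind + (suffix.length : Int) - 1 - (i : Int)

-- ===== PRECONDITION & SPEC =====
-- Pre_ excludes exactly the out-of-range indices, on which Python A raises IndexError.
def Pre_find_nearest_high (current_ind : Int) (height : List Int) : Prop :=
  -(height.length : Int) ≤ current_ind ∧ current_ind < height.length
instance (current_ind : Int) (height : List Int) : Decidable (Pre_find_nearest_high current_ind height) := by unfold Pre_find_nearest_high; infer_instance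
def pvWitness_find_nearest_high : Int × List Int := (0, [1, 2])

-- At current_ind = -1 A's slice height[current_ind+1:] wraps to the WHOLE list, so A returns the
-- last index of the global maximum, while B returns -1 (the element itself, matching A's own
-- behaviour at the equivalent index len-1), which is the intended 'nearest high from the last bar'.
def D_find_nearest_high (current_ind : Int) (height : List Int) : Prop := current_ind = -1
instance (current_ind : Int) (height : List Int) : Decidable (D_find_nearest_high current_ind height) := by unfold D_find_nearest_high; infer_instance

def Spec_find_nearest_high (current_ind : Int) (height : List Int) (out : Int) : Prop :=
  ¬ D_find_nearest_high current_ind height → out = find_nearest_high_alt current_ind height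
instance (current_ind : Int) (height : List Int) (out : Int) : Decidable (Spec_find_nearest_high current_ind height out) := by unfold Spec_find_nearest_high; infer_instance

def pvDiffWitness_find_nearest_high : Int × List Int := (-1, [5])
def pvDiffWitnessOut_find_nearest_high : Int × Int := (0, -1)

-- ===== CLAIM (what is proved, stated in full; the proofs are below) =====
def Claim_unchanged_find_nearest_high : Prop := ∀ (current_ind : Int) (height : List Int), Dom_find_nearest_high current_ind height → Pre_find_nearest_high current_ind height → Spec_find_nearest_high current_ind height (find_nearest_high current_ind height)
def Claim_changed_find_nearest_high : Prop := Dom_find_nearest_high (pvDiffWitness_find_nearest_high.1) (pvDiffWitness_find_nearest_high.2) ∧ Pre_find_nearest_high (pvDiffWitness_find_nearest_high.1) (pvDiffWitness_find_nearest_high.2) ∧ D_find_nearest_high (pvDiffWitness_find_nearest_high.1) (pvDiffWitness_find_nearest_high.2) ∧ find_nearest_high (pvDiffWitness_find_nearest_high.1) (pvDiffWitness_find_nearest_high.2) = pvDiffWitnessOut_find_nearest_high.1 ∧ find_nearest_high_alt (pvDiffWitness_find_nearest_high.1) (pvDiffWitness_find_nearest_high.2) = pvDiffWitnessOut_find_nearest_high.2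 ∧ pvDiffWitnessOut_find_nearest_high.1 ≠ pvDiffWitnessOut_find_nearest_high.2
def Claim_exact_find_nearest_high : Prop := ∀ (current_ind : Int) (height : List Int), Dom_find_nearest_high current_ind height → Pre_find_nearest_high current_ind height → D_find_nearest_high current_ind height → find_nearest_high current_ind height ≠ find_nearest_high_alt current_ind height

-- ===== LEMMAS AND PROOFS =====

-- 'la t c': position (in t) of the last element that is ≥ the running maximum of c and all
-- elements before it; exactly the position where A's loop last updates its pointer.
def la : List Int → Int → Option Nat
  | [], _ => none
  | h :: t, c =>
      match la t (max c h) with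
      | some j => some (j + 1)
      | none => if h ≥ c then some 0 else none

-- pointer offset into c :: t of the last occurrence of the maximum
def laJ (t : List Int) (c : Int) : Nat :=
  match la t c with
  | some j => j + 1
  | none => 0

lemma la_length : ∀ (t : List Int) (c : Int) (j : Nat), la t c = some j → j < t.length := by
  intro t
  induction t with
  | nil => intro c j h; simp [la] at h
  | cons h t ih =>
      intro c j hla
      simp only [la] at hla
      cases hx : la t (max c h) with
      | some j' =>
          rw [hx] at hla
          simp only [Option.some.injEq] at hla
          have := ih (max c h) j' hx
          simp only [List.length_cons]
          omega
      | none =>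
          rw [hx] at hla
          by_cases hc : h ≥ c
          · rw [if_pos hc] at hla
            simp only [Option.some.injEq] at hla
            simp only [List.length_cons]
            omega
          · rw [if_neg hc] at hla
            exact absurd hla (by simp)

lemma la_none_iff : ∀ (t : List Int) (c : Int), la t c = none ↔ ∀ x ∈ t, x < c := by
  intro t
  induction t with
  | nil => intro c; simp [la]
  | cons h t ih =>
      intro c
      constructor
      · intro hnone
        simp only [la] at hnone
        cases hx : la t (max c h) with
        | some j => rw [hx] at hnone; simp at hnone
        | none =>
            rw [hx] at hnone
            have hc : ¬ h ≥ c := by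
              by_contra hc
              simp [hc] at hnone
            have hall := (ih (max c h)).1 hx
            intro x hxmem
            rcases List.mem_cons.1 hxmem with rfl | hx'
            · omega
            · have h1 := hall x hx'
              have h2 : max c h = c := max_eq_left (by omega)
              omega
      · intro hall
        simp only [la]
        have h1 : la t (max c h) = none :=
          (ih (max c h)).2 (fun x hx =>
            lt_of_lt_of_le (hall x (List.mem_cons_of_mem _ hx)) (le_max_left _ _))
        rw [h1]
        have h2 : ¬ h ≥ c := by
          have := hall h (by simp)
          omega
        simp [h2]

lemma loopEq : ∀ (t : List Int) (ci : Int) (ind : Nat) (p c : Int),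
    fnhLoop ci ind t p c =
      match la t c with
      | some j => (ind : Int) + (j : Int) + ci + 1
      | none => p := by
  intro t
  induction t with
  | nil => intro ci ind p c; simp [fnhLoop, la]
  | cons h t ih =>
      intro ci ind p c
      simp only [fnhLoop, la]
      by_cases hc : h ≥ c
      · rw [if_pos hc]
        rw [ih]
        have hmax : max c h = h := max_eq_right hc
        rw [hmax]
        cases hx : la t h with
        | some j => simp; ring
        | none => simp [hc]
      · rw [if_neg hc]
        rw [ih]
        have hmax : max c h = c := max_eq_left (by omega)
        rw [hmax]
        cases hx : la t c with
        | some j => simp; ring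
        | none => simp [hc]

lemma la_append : ∀ (t : List Int) (c x : Int),
    la (t ++ [x]) c = if x ≥ t.foldl max c then some t.length else la t c := by
  intro t
  induction t with
  | nil => intro c x; simp [la]
  | cons h t ih =>
      intro c x
      simp only [List.cons_append, la, List.foldl_cons]
      rw [ih]
      by_cases hx : x ≥ List.foldl max (max c h) t
      · simp [hx]
      · simp [hx]

lemma B2 : ∀ (t : List Int) (a : Int),
    PySem.List.index? ((a :: t).reverse) (t.foldl max a) = some (t.length - laJ t a) := by
  intro t a
  induction t using List.reverseRecOn with
  | nil => simp [laJ, la]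
  | append_singleton t' x ih =>
      have hm' : List.foldl max a (t' ++ [x]) = max (List.foldl max a t') x := by
        simp [List.foldl_append]
      have hrev : (a :: (t' ++ [x])).reverse = x :: (a :: t').reverse := by
        simp
      by_cases hx : x ≥ List.foldl max a t'
      · have hfx : List.foldl max a (t' ++ [x]) = x := by
          rw [hm']; exact max_eq_right hx
        rw [hfx, hrev, PySem.List.index?_cons_self]
        have hJ : laJ (t' ++ [x]) a = t'.length + 1 := by
          simp [laJ, la_append, hx]
        rw [hJ]
        simp
      · have hlt : x < List.foldl max a t' := by omega
        have hmm : List.foldl max a (t' ++ [x]) = List.foldl max a t' := by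
          rw [hm']; exact max_eq_left (by omega)
        have hne : x ≠ List.foldl max a t' := by omega
        rw [hmm, hrev, PySem.List.index?_cons_of_ne _ hne, ih]
        have hJ : laJ (t' ++ [x]) a = laJ t' a := by
          simp [laJ, la_append, hx]
        have hle : laJ t' a ≤ t'.length := by
          unfold laJ
          cases hla : la t' a with
          | some j => have := la_length t' a j hla; simp only []; omega
          | none => simp
        rw [hJ]
        simp
        omega

-- both sides equal ci + laJ t a once the list facts are in hand
lemma body_eq (ci : Int) (height : List Int) (a : Int) (t : List Int)
    (h1 : PySem.List.pyGet? height ci = some a)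
    (h2 : PySem.List.slice height (some ci) none = a :: t)
    (h3 : PySem.List.slice height (some (ci + 1)) none = t) :
    find_nearest_high ci height = find_nearest_high_alt ci height := by
  unfold find_nearest_high find_nearest_high_alt
  rw [h1]
  have hle : laJ t a ≤ t.length := by
    unfold laJ
    cases hla : la t a with
    | some j => have := la_length t a j hla; simp; omega
    | none => simp
  simp only [h2, h3, PySem.List.max?_id_cons, B2, loopEq]
  have hlaJ : (match la t a with
      | some j => ((0 : Nat) : Int) + (j : Int) + ci + 1
      | none => ci) = ci + (laJ t a : Int) := by
    unfold laJ
    cases hla : la t a with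
    | some j => simp; ring
    | none => simp
  rw [hlaJ]
  simp only [List.length_cons]
  push_cast [Nat.cast_sub hle]
  ring

lemma drop_cons_of_lt (height : List Int) (k : Nat) (hk : k < height.length) :
    height.drop k = height[k] :: height.drop (k + 1) :=
  List.drop_eq_getElem_cons hk

-- ===== VERDICT (by name: the statement is the Claim_ definition above) =====
theorem find_nearest_high_spec : Claim_unchanged_find_nearest_high := by
  intro ci height _ hpre hnd
  unfold Pre_find_nearest_high at hpre
  unfold D_find_nearest_high at hnd
  by_cases hpos : 0 ≤ ci
  · -- 0 ≤ current_ind < len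
    have hk : ci.toNat < height.length := by omega
    have h1 : PySem.List.pyGet? height ci = some height[ci.toNat] :=
      PySem.List.pyGet?_eq_some_getElem height hpos (by omega)
    have h2 : PySem.List.slice height (some ci) none = height[ci.toNat] :: height.drop (ci.toNat + 1) := by
      rw [PySem.List.slice_from height hpos, drop_cons_of_lt height ci.toNat hk]
    have h3 : PySem.List.slice height (some (ci + 1)) none = height.drop (ci.toNat + 1) := by
      rw [PySem.List.slice_from height (by omega)]
      congr 1
      omega
    exact body_eq ci height _ _ h1 h2 h3
  · have hneg : ci < 0 := by omega
    set j : Nat := (-ci).toNat with hjdef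
    have hj2 : 2 ≤ j := by omega
    have hjn : j ≤ height.length := by omega
    have hci : ci = -(j : Int) := by omega
    have hk : height.length - j < height.length := by omega
    have h1 : PySem.List.pyGet? height ci = some height[height.length - j] := by
      rw [hci, PySem.List.pyGet?_neg_natCast height j (by omega) hjn]
      exact List.getElem?_eq_getElem hk
    have h2 : PySem.List.slice height (some ci) none
        = height[height.length - j] :: height.drop (height.length - j + 1) := by
      rw [hci, PySem.List.slice_from_neg_natCast height j (by omega), drop_cons_of_lt height _ hk]
    have h3 : PySem.List.slice height (some (ci + 1)) none = height.drop (height.length - j + 1) := by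
      have : ci + 1 = -(((j - 1 : Nat)) : Int) := by omega
      rw [this, PySem.List.slice_from_neg_natCast height (j-1) (by omega)]
      congr 1
      omega
    exact body_eq ci height _ _ h1 h2 h3

theorem find_nearest_high_changed : Claim_changed_find_nearest_high := by
  unfold Claim_changed_find_nearest_high; decide

theorem find_nearest_high_tight : Claim_exact_find_nearest_high := by
  intro ci height _ hpre hd
  unfold Pre_find_nearest_high at hpre
  unfold D_find_nearest_high at hd
  subst hd
  have hn : 1 ≤ height.length := by omega
  have hk : height.length - 1 < height.length := by omega
  have h1 : PySem.List.pyGet? height (-1) = some height[height.length - 1] := by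
    rw [PySem.List.pyGet?_neg_one, List.getLast?_eq_getElem?]
    exact List.getElem?_eq_getElem hk
  have hdrop : height.drop (height.length - 1) = [height[height.length - 1]] := by
    rw [drop_cons_of_lt height _ hk]
    have : height.length - 1 + 1 = height.length := by omega
    rw [this, List.drop_length]
  -- A's value: the loop runs over the WHOLE list and is ≥ 0
  have hA : 0 ≤ find_nearest_high (-1) height := by
    unfold find_nearest_high
    have hslice : PySem.List.slice height (some ((-1 : Int) + 1)) none = height := by
      have h0 : (-1 : Int) + 1 = ((0 : Nat) : Int) := by norm_num
      rw [h0, PySem.List.slice_from_natCast height 0, List.drop_zero]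
    simp only [h1, hslice, loopEq]
    cases hla : la height height[height.length - 1] with
    | some jj => simp
    | none =>
        exfalso
        have := (la_none_iff height height[height.length - 1]).1 hla
          height[height.length - 1] (List.getElem_mem hk)
        omega
  -- B's value: the suffix is the one-element list, so B returns -1
  have hB : find_nearest_high_alt (-1) height = -1 := by
    unfold find_nearest_high_alt
    have hslice : PySem.List.slice height (some (-1)) none = [height[height.length - 1]] := by
      rw [PySem.List.slice_from_neg_one, hdrop]
    simp only [h1, hslice, PySem.List.max?_id_cons, List.foldl_nil, List.reverse_cons,
      List.reverse_nil, List.nil_append, PySem.List.index?_cons_self]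
    norm_num
  intro heq
  rw [hB] at heq
  omega
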